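-- pv_equiv track=rewrite | github.com/laurakelly7/Aplicacao-com-Dados | Aplicação com Dados/Arquivo_Principal.py | ufs
-- ===== SOURCE A (Python) =====
-- def ufs(base):
--     uf = {}
--     for linhas in base:
--         unidade_federativa = linhas["UF"]
--         unidade_federativa = unidade_federativa[:2]
--         if "-" in unidade_federativa:
--             unidade_federativa = "Sem Est."
--
--         if unidade_federativa in uf:
--             uf[unidade_federativa] += 1
--         else:
--             uf[unidade_federativa] = 1
--
--     return uf
-- ===== SOURCE B (Python) =====
-- def ufs(base):
--     keys = []
--     for linhas in base:
--         k = linhas["UF"][:2]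
--         keys.append("Sem Est." if "-" in k else k)
--
--     result = {}
--     ks = keys
--     while ks:
--         head = ks[0]
--         rest = [k for k in ks[1:] if k != head]
--         result[head] = len(ks) - len(rest)
--         ks = rest
--     return result
-- ===== Notes on version B (the rewrite author's own statement) =====
-- stated objective: alternative
-- what changed: B replaces A's single-pass dict-increment counting by partition refinement: it materialises the transformed key list, then repeatedly peels off the group of the first remaining key by filtering it out, obtaining each count as a difference of list lengths, so no counter is ever incremented.
import Mathlib
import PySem

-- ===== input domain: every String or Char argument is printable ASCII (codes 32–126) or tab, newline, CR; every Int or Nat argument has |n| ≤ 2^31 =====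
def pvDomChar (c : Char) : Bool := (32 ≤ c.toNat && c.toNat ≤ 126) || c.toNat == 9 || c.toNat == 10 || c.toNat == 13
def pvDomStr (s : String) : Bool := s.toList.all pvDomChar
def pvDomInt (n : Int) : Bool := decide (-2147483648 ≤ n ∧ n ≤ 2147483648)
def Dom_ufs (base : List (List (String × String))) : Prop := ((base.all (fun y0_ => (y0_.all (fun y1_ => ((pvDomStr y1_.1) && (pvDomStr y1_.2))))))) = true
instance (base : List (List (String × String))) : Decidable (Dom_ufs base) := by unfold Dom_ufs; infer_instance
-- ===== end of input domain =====

-- B replaces A's single-pass dict-increment counting by partition refinement (peel off the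
-- first key's group by filtering, count = length difference); alternative, not faster.


-- ===== PORT A =====
-- shared key transform: linhas["UF"][:2], replaced by "Sem Est." when it contains '-'
-- (the .getD "" is never reached inside Pre_, which guarantees the "UF" key is present)
def pvUfKey (linhas : List (String × String)) : String :=
  let u := PySem.Str.slice (((PySem.Dict.mk linhas).get? "UF").getD "") none (some 2)
  if PySem.Str.isIn "-" u then "Sem Est." else u

def ufs (base : List (List (String × String))) : List (String × Int) :=
  (base.foldl
    (fun (uf : PySem.Dict String Int) linhas =>
      let k := pvUfKey linhas
      if uf.contains k then uf.insert k (uf.getD k 0 + 1) else uf.insert k 1)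
    PySem.Dict.empty).items

-- ===== PORT B =====
-- the 'while ks:' partition-refinement loop of Source B, as structural recursion on the key list
def ufsGo : List String → List (String × Int)
  | [] => []
  | h :: t =>
    (h, ((h :: t).length : Int) - ((t.filter (fun k => k != h)).length : Int))
      :: ufsGo (t.filter (fun k => k != h))
termination_by ks => ks.length
decreasing_by
  simp only [List.length_cons, List.length_unattach]
  exact Nat.lt_succ_of_le (le_trans (List.length_filter_le _ _) (by simp))

def ufs_alt (base : List (List (String × String))) : List (String × Int) :=
  let keys := base.foldl (fun acc linhas => acc ++ [pvUfKey linhas]) []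
  ufsGo keys

-- ===== PRECONDITION & SPEC =====
-- Pre_ excludes exactly the inputs on which A raises KeyError: a record without the "UF" key.
def Pre_ufs (base : List (List (String × String))) : Prop :=
  ∀ linhas ∈ base, (PySem.Dict.mk linhas).contains "UF" = true
instance (base : List (List (String × String))) : Decidable (Pre_ufs base) := by unfold Pre_ufs; infer_instance
def pvWitness_ufs : (List (List (String × String))) := [[("UF", "SP")], [("UF", "A-1")]]

def Spec_ufs (base : List (List (String × String))) (out : List (String × Int)) : Prop := out = ufs_alt base
instance (base : List (List (String × String))) (out : List (String × Int)) : Decidable (Spec_ufs base out) := by unfold Spec_ufs; infer_instance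

-- ===== CLAIM (what is proved, stated in full; the proofs are below) =====
def Claim_equal_ufs : Prop := ∀ (base : List (List (String × String))), Dom_ufs base → Pre_ufs base → Spec_ufs base (ufs base)

-- ===== LEMMAS AND PROOFS =====

-- A's two branches are both 'insert k (getD k 0 + 1)': when the key is absent, getD gives 0.
lemma ufs_step_eq (uf : PySem.Dict String Int) (k : String) :
    (if uf.contains k then uf.insert k (uf.getD k 0 + 1) else uf.insert k 1)
      = uf.insert k (uf.getD k 0 + 1) := by
  by_cases h : uf.contains k = true
  · simp [h]
  · simp only [Bool.not_eq_true] at h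
    simp [h, PySem.Dict.getD, (PySem.Dict.get?_eq_none_iff_contains uf k).mpr h]

lemma ufs_eq_counter_items (base : List (List (String × String))) :
    ufs base = (PySem.Dict.counter (base.map pvUfKey)).items := by
  unfold ufs
  simp only []
  have h1 := PySem.List.foldl_congr_mem
    (l := base) (init := (PySem.Dict.empty : PySem.Dict String Int))
    (f := fun uf linhas =>
      if uf.contains (pvUfKey linhas) then uf.insert (pvUfKey linhas) (uf.getD (pvUfKey linhas) 0 + 1)
      else uf.insert (pvUfKey linhas) 1)
    (g := fun uf linhas =>
      PySem.Dict.insert uf (pvUfKey linhas) (uf.getD (pvUfKey linhas) 0 + 1))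
    (fun acc x _ => ufs_step_eq acc (pvUfKey x))
  rw [h1, ← List.foldl_map (f := pvUfKey)
      (g := fun (uf : PySem.Dict String Int) k => uf.insert k (uf.getD k 0 + 1)),
    PySem.Dict.foldl_insert_getD_add_one_eq_counter]

-- dedup commutes with the filter B performs ('discard' is that filter definitionally)
lemma filter_ofList (t : List String) (h : String) :
    (PySem.Set.ofList t).filter (fun k => k != h) = PySem.Set.ofList (t.filter (fun k => k != h)) := by
  have hd : ∀ (s : List String) (y : String),
      PySem.Set.discard s y = s.filter (fun k => k != y) := fun _ _ => rfl
  induction t with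
  | nil => simp [PySem.Set.ofList]
  | cons x xs ih =>
    rw [PySem.Set.ofList_cons, hd]
    by_cases hx : x = h
    · subst hx
      simp only [List.filter_cons, bne_self_eq_false, Bool.false_eq_true, if_false,
        List.filter_filter, ← ih, List.filter_filter]
      apply List.filter_congr; intro a _; simp
    · have hb : (x != h) = true := bne_iff_ne.mpr hx
      simp only [List.filter_cons, hb, if_true]
      rw [PySem.Set.ofList_cons, hd, ← ih, List.filter_filter, List.filter_filter]
      congr 1
      apply List.filter_congr; intro a _; simp [Bool.and_comm]

-- the elements B filters away are exactly the occurrences of the head key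
lemma count_len (t : List String) (h : String) :
    (t.filter (fun k => k != h)).length + t.count h = t.length := by
  induction t with
  | nil => simp
  | cons x xs ih =>
    by_cases hx : x = h
    · simp [hx, ih.symm]; omega
    · simp [hx, ih.symm, bne_iff_ne]; omega

-- B's loop computes Counter(keys).items(): each round emits the first remaining key with its count
lemma ufsGo_eq_aux (n : Nat) : ∀ (ks : List String), ks.length ≤ n →
    ufsGo ks = (PySem.Set.ofList ks).map (fun k => (k, (ks.count k : Int))) := by
  induction n with
  | zero =>
    intro ks hks
    have : ks = [] := List.eq_nil_of_length_eq_zero (Nat.le_zero.mp hks)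
    subst this; simp [ufsGo, PySem.Set.ofList]
  | succ n ih =>
    intro ks hks
    match ks with
    | [] => simp [ufsGo, PySem.Set.ofList]
    | h :: t =>
      have hlen : (t.filter (fun k => k != h)).length ≤ n := by
        have := List.length_filter_le (fun k => k != h) t
        simp at hks; omega
      have hdis : (PySem.Set.ofList t).discard h
          = PySem.Set.ofList (t.filter (fun k => k != h)) := by
        rw [← filter_ofList]; rfl
      rw [ufsGo, ih _ hlen, PySem.Set.ofList_cons, hdis, List.map_cons]
      congr 1
      · have := count_len t h
        simp only [List.count_cons_self, List.length_cons]
        congr 1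
        omega
      · apply List.map_congr_left
        intro k hk
        have hkm : k ∈ t.filter (fun k => k != h) :=
          (PySem.Set.mem_ofList _ _).mp hk
        have hkp : (k != h) = true := (List.mem_filter.mp hkm).2
        have h1 : (t.filter (fun k => k != h)).count k = t.count k := List.count_filter hkp
        have h2 : (h :: t).count k = t.count k := by simp [Ne.symm (bne_iff_ne.mp hkp)]
        rw [h1, h2]

lemma ufsGo_eq (ks : List String) :
    ufsGo ks = (PySem.Set.ofList ks).map (fun k => (k, (ks.count k : Int))) :=
  ufsGo_eq_aux ks.length ks le_rfl


-- ===== VERDICT (by name: the statement is the Claim_ definition above) =====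
theorem ufs_spec : Claim_equal_ufs := by
  intro base _ _
  unfold Spec_ufs ufs_alt
  simp only [PySem.List.foldl_append_singleton_eq_map, ufs_eq_counter_items,
    PySem.Dict.items_counter, ufsGo_eq, List.nil_append]
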